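-- pv_equiv track=rewrite | github.com/enricotomasi/GeeksforGeeks_problems | Easy/Good Numbers.py | goodNumbers
-- ===== SOURCE A (Python) =====
-- def goodNumbers(L, R, D):
--     #code here
--     ans = []
--
--     for i in range(L, R+1):
--         somma = 0
--         temp = i
--
--         while i != 0:
--              digit = i %10
--              if digit == D:
--                  break
--
--              somma += digit
--              numero = i//10
--              if numero != 0 and somma >= numero %10:
--                break
--              i = numero
--
--         if i == 0:
--             ans.append(temp)
--
--     return ans
-- ===== SOURCE B (Python) =====
-- def goodNumbers(L, R, D):
--     # Generate every "good" number directly by its digit structure (each digit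
--     # exceeds the sum of the digits to its right, and no digit equals D),
--     # then keep those inside [L, R] in ascending order.  0 (the empty digit
--     # string) is always good.
--     goods = [0]
--
--     def extend(n, s, place):
--         # n is good with digit sum s; try prepending a more significant digit e.
--         for e in range(s + 1, 10):
--             if e != D:
--                 goods.append(n + e * place)
--                 extend(n + e * place, s + e, place * 10)
--
--     for d0 in range(10):
--         if d0 != D:
--             if d0 > 0:
--                 goods.append(d0)
--             extend(d0, d0, 10)
--
--     return sorted(x for x in goods if L <= x <= R)
-- ===== Notes on version B (the rewrite author's own statement) =====
-- stated objective: faster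
-- what changed: Instead of testing every integer in [L,R] with a per-number digit loop, B generates the sparse set of good numbers directly by DFS over digit structure (each new more-significant digit must exceed the running digit sum and differ from D), then filters to [L,R] and sorts.
import Mathlib
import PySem

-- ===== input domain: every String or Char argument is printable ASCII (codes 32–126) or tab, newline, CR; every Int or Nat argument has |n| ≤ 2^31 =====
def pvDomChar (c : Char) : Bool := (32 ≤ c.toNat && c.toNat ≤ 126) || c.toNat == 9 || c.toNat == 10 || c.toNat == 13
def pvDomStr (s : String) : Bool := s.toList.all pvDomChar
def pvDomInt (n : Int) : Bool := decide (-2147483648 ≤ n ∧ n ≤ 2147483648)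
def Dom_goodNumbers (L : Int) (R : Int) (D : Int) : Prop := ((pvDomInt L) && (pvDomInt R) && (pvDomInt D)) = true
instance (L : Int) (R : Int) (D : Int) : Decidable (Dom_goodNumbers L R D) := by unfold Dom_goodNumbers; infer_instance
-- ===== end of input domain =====

-- B replaces A's per-number digit loop over the whole range by direct DFS generation of the
-- sparse set of good numbers (each digit exceeds the sum of the digits to its right, no digit D),
-- filtered to [L,R] and sorted: asymptotically faster for wide ranges.

-- ===== PORT A =====
-- A's inner `while i != 0` loop; returns the final value of i.  The fuel `i.natAbs + 2`
-- is a provably sufficient iteration bound (lemmas below), so the port is exact.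
def goodNumbersLoop : Nat → Int → Int → Int → Int
  | 0, i, _, _ => i
  | fuel+1, i, somma, D =>
    if i = 0 then i
    else
      let digit := PySem.Int.mod i 10
      if digit = D then i
      else
        let somma' := somma + digit
        let numero := PySem.Int.floordiv i 10
        if numero ≠ 0 ∧ somma' ≥ PySem.Int.mod numero 10 then i
        else goodNumbersLoop fuel numero somma' D

def goodNumbers (L : Int) (R : Int) (D : Int) : List Int :=
  (PySem.List.pyRange L (R+1) 1).foldl
    (fun ans i => if goodNumbersLoop (i.natAbs + 2) i 0 D = 0 then ans ++ [i] else ans) []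

-- ===== PORT B =====
-- B's recursive `extend(n, s, place)`; returns the list it appends to `goods`.  The fuel 12
-- is a provably sufficient recursion-depth bound (each level at least doubles the digit sum s,
-- and the loop range is empty once s ≥ 9), so the port is exact.
def extendGo : Nat → Int → Int → Int → Int → List Int
  | 0, _, _, _, _ => []
  | fuel+1, n, s, place, D =>
    (PySem.List.pyRange (s+1) 10 1).foldl
      (fun acc e =>
        if e ≠ D then acc ++ ((n + e * place) :: extendGo fuel (n + e * place) (s + e) (place * 10) D)
        else acc) []

def goodNumbers_alt (L : Int) (R : Int) (D : Int) : List Int :=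
  let goods : List Int :=
    (PySem.List.pyRange 0 10 1).foldl
      (fun g d0 =>
        if d0 ≠ D then (g ++ (if 0 < d0 then [d0] else [])) ++ extendGo 12 d0 d0 10 D
        else g) [0]
  PySem.List.sorted (goods.filter (fun x => decide (L ≤ x) && decide (x ≤ R))) (fun x => x) false

-- ===== PRECONDITION & SPEC =====
def Spec_goodNumbers (L : Int) (R : Int) (D : Int) (out : List Int) : Prop := out = goodNumbers_alt L R D
instance (L : Int) (R : Int) (D : Int) (out : List Int) : Decidable (Spec_goodNumbers L R D out) := by unfold Spec_goodNumbers; infer_instance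

-- ===== CLAIM (what is proved, stated in full; the proofs are below) =====
def Claim_equal_goodNumbers : Prop := ∀ (L : Int) (R : Int) (D : Int), Dom_goodNumbers L R D → Spec_goodNumbers L R D (goodNumbers L R D)

-- ===== LEMMAS AND PROOFS =====


-- Digit-chain predicate: m ≥ 1 and, reading m's digits from least significant with running
-- lower-digit sum s, every digit exceeds the incoming sum and differs from D.
def goodHi (m : Int) (s : Int) (D : Int) : Bool :=
  if h : m ≤ 0 then false
  else
    let e := m % 10
    let q := m / 10
    decide (s < e) && decide (e ≠ D) && (decide (q = 0) || goodHi q (s + e) D)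
termination_by m.natAbs
decreasing_by simp at h ⊢; omega

def isGood (i : Int) (D : Int) : Bool :=
  if i < 0 then false
  else if i = 0 then true
  else decide (i % 10 ≠ D) && (decide (i / 10 = 0) || goodHi (i / 10) (i % 10) D)

theorem goodNumbersLoop_zero (fuel : Nat) (s D : Int) : goodNumbersLoop fuel 0 s D = 0 := by
  cases fuel <;> simp [goodNumbersLoop]

theorem goodNumbersLoop_neg (fuel : Nat) : ∀ (i s D : Int), i < 0 → 0 ≤ s → goodNumbersLoop fuel i s D < 0 := by
  induction fuel with
  | zero => intro i s D hi _; simpa [goodNumbersLoop] using hi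
  | succ fuel ih =>
    intro i s D hi hs
    rw [goodNumbersLoop]
    simp only [PySem.Int.mod_eq_emod_of_pos (by norm_num : (0:Int) < 10),
               PySem.Int.floordiv_eq_ediv_of_pos (by norm_num : (0:Int) < 10)]
    split_ifs with h1 h2 h3
    · omega
    · omega
    · omega
    · exact ih _ _ _ (by omega) (by omega)

theorem goodNumbersLoop_pos : ∀ (fuel : Nat) (i s D : Int), 0 < i → 0 ≤ s → i.natAbs + 1 ≤ fuel →
    ((goodNumbersLoop fuel i s D = 0) ↔ (i % 10 ≠ D ∧ (i / 10 = 0 ∨ goodHi (i / 10) (s + i % 10) D = true))) := by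
  intro fuel
  induction fuel with
  | zero => intro i s D hi _ hf; omega
  | succ fuel ih =>
    intro i s D hi hs hf
    rw [goodNumbersLoop]
    simp only [PySem.Int.mod_eq_emod_of_pos (by norm_num : (0:Int) < 10),
               PySem.Int.floordiv_eq_ediv_of_pos (by norm_num : (0:Int) < 10)]
    rw [if_neg (by omega : ¬ i = 0)]
    by_cases hD : i % 10 = D
    · rw [if_pos hD]
      constructor
      · intro h; omega
      · rintro ⟨h1, _⟩; exact absurd hD h1
    · rw [if_neg hD]
      by_cases hq : i / 10 = 0
      · rw [if_neg (by simp [hq])]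
        rw [hq, goodNumbersLoop_zero]
        simp [hD]
      · by_cases hbr : s + i % 10 ≥ (i / 10) % 10
        · rw [if_pos ⟨hq, hbr⟩]
          rw [goodHi]
          rw [dif_neg (by omega : ¬ i / 10 ≤ 0)]
          simp only [Bool.and_eq_true, decide_eq_true_eq]
          constructor
          · intro h; omega
          · rintro ⟨-, h | ⟨⟨h1, -⟩, -⟩⟩
            · exact absurd h hq
            · omega
        · rw [if_neg (by intro h; exact hbr h.2)]
          conv_rhs => rw [goodHi]
          rw [dif_neg (by omega : ¬ i / 10 ≤ 0)]
          rw [ih (i / 10) (s + i % 10) D (by omega) (by omega) (by omega)]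
          simp only [Bool.and_eq_true, Bool.or_eq_true, decide_eq_true_eq]
          constructor
          · rintro ⟨h1, h2⟩
            refine ⟨hD, Or.inr ⟨⟨by omega, h1⟩, ?_⟩⟩
            rcases h2 with h | h
            · exact Or.inl (by simpa using h)
            · exact Or.inr h
          · rintro ⟨-, h | ⟨⟨-, h1⟩, h2⟩⟩
            · exact absurd h hq
            · refine ⟨h1, ?_⟩
              rcases h2 with h | h
              · exact Or.inl (by simpa using h)
              · exact Or.inr h

theorem loop_eq_isGood (i D : Int) :
    (decide (goodNumbersLoop (i.natAbs + 2) i 0 D = 0)) = isGood i D := by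
  rcases lt_trichotomy i 0 with h | h | h
  · have := goodNumbersLoop_neg (i.natAbs + 2) i 0 D h le_rfl
    simp [isGood, h]
    omega
  · subst h
    simp [goodNumbersLoop_zero, isGood]
  · have h1 := goodNumbersLoop_pos (i.natAbs + 2) i 0 D h le_rfl (by omega)
    rw [zero_add] at h1
    rw [isGood, if_neg (by omega), if_neg (by omega)]
    rw [show (decide (i % 10 ≠ D) && (decide (i / 10 = 0) || goodHi (i / 10) (i % 10) D)) =
        decide (i % 10 ≠ D ∧ (i / 10 = 0 ∨ goodHi (i / 10) (i % 10) D = true)) from by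
      by_cases h1 : i % 10 ≠ D <;> by_cases h2 : i / 10 = 0 <;>
        cases h3 : goodHi (i / 10) (i % 10) D <;> simp [h1, h2]]
    rw [decide_eq_decide]
    exact h1

theorem extendGo_succ (fuel : Nat) (n s place D : Int) :
    extendGo (fuel+1) n s place D =
      (PySem.List.pyRange (s+1) 10 1).flatMap
        (fun e => if e ≠ D then (n + e * place) :: extendGo fuel (n + e * place) (s + e) (place * 10) D else []) := by
  rw [extendGo]
  rw [PySem.List.foldl_congr_mem _ _
      (fun acc e => acc ++ (if e ≠ D then (n + e * place) :: extendGo fuel (n + e * place) (s + e) (place * 10) D else []))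
      _ (by
        intro acc x _
        dsimp only
        by_cases h : x ≠ D
        · rw [if_pos h, if_pos h]
        · rw [if_neg h, if_neg h]; simp)]
  rw [PySem.List.foldl_append_eq_flatMap]
  simp

theorem extendGo_mem_rep : ∀ (fuel : Nat) (n s place D x : Int), 0 ≤ s →
    x ∈ extendGo fuel n s place D →
    ∃ e m', s < e ∧ e < 10 ∧ 0 ≤ m' ∧ x = n + place * (e + 10 * m') := by
  intro fuel
  induction fuel with
  | zero => intro n s place D x _ hx; simp [extendGo] at hx
  | succ fuel ih =>
    intro n s place D x hs hx
    rw [extendGo_succ] at hx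
    simp only [List.mem_flatMap, PySem.List.mem_pyRange_one] at hx
    obtain ⟨e, ⟨he1, he2⟩, hx⟩ := hx
    by_cases hD : e = D
    · simp [hD] at hx
    · rw [if_pos hD] at hx
      rcases List.mem_cons.mp hx with h | h
      · exact ⟨e, 0, by omega, by omega, le_rfl, by rw [h]; ring⟩
      · obtain ⟨e₂, m₂, h1, h2, h3, h4⟩ := ih _ _ _ _ _ (by omega) h
        refine ⟨e, e₂ + 10 * m₂, by omega, by omega, by omega, ?_⟩
        rw [h4]; ring

theorem extendGo_mem : ∀ (fuel : Nat) (n s place D : Int), 0 ≤ s → (9 - s).toNat < fuel → ∀ (x : Int),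
    (x ∈ extendGo fuel n s place D ↔ ∃ m, 1 ≤ m ∧ goodHi m s D = true ∧ x = n + place * m) := by
  intro fuel
  induction fuel with
  | zero => intro n s place D hs hf x; omega
  | succ fuel ih =>
    intro n s place D hs hf x
    rw [extendGo_succ]
    simp only [List.mem_flatMap, PySem.List.mem_pyRange_one]
    constructor
    · rintro ⟨e, ⟨he1, he2⟩, hx⟩
      by_cases hD : e = D
      · simp [hD] at hx
      · rw [if_pos hD] at hx
        rcases List.mem_cons.mp hx with h | h
        · refine ⟨e, by omega, ?_, by rw [h]; ring⟩
          rw [goodHi, dif_neg (by omega : ¬ e ≤ 0)]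
          simp only [Bool.and_eq_true, Bool.or_eq_true, decide_eq_true_eq]
          rw [show e % 10 = e from by omega, show e / 10 = 0 from by omega]
          exact ⟨⟨by omega, hD⟩, Or.inl rfl⟩
        · obtain ⟨m₂, hm₂, hg, hx⟩ := (ih _ _ _ _ (by omega) (by omega) _).mp h
          refine ⟨e + 10 * m₂, by omega, ?_, by rw [hx]; ring⟩
          rw [goodHi, dif_neg (by omega : ¬ e + 10 * m₂ ≤ 0)]
          simp only [Bool.and_eq_true, Bool.or_eq_true, decide_eq_true_eq]
          have he : (e + 10 * m₂) % 10 = e := by omega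
          have hq : (e + 10 * m₂) / 10 = m₂ := by omega
          rw [he, hq]
          exact ⟨⟨by omega, hD⟩, Or.inr hg⟩
    · rintro ⟨m, hm, hg, rfl⟩
      rw [goodHi, dif_neg (by omega : ¬ m ≤ 0)] at hg
      simp only [Bool.and_eq_true, Bool.or_eq_true, decide_eq_true_eq] at hg
      obtain ⟨⟨hlt, hD⟩, hrest⟩ := hg
      have hlt' : s < m % 10 := hlt
      have hm10 : m % 10 < 10 := by omega
      refine ⟨m % 10, ⟨by omega, by omega⟩, ?_⟩
      rw [if_pos hD]
      rcases hrest with h0 | hgq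
      · have : m % 10 = m := by omega
        apply List.mem_cons.mpr
        exact Or.inl (by rw [this]; ring)
      · apply List.mem_cons.mpr
        refine Or.inr ?_
        have hfe : (9 - (s + m % 10)).toNat < fuel := by omega
        rw [ih (n + m % 10 * place) (s + m % 10) (place * 10) D (by omega) hfe]
        have hq1 : 1 ≤ m / 10 := by
          by_contra hq0
          rw [goodHi, dif_pos (by omega : m / 10 ≤ 0)] at hgq
          simp at hgq
        refine ⟨m / 10, hq1, hgq, ?_⟩
        have hdec : m = m % 10 + 10 * (m / 10) := by omega
        linear_combination place * hdec

theorem extendGo_nodup : ∀ (fuel : Nat) (n s place D : Int), 0 ≤ s → 0 < place →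
    (extendGo fuel n s place D).Nodup := by
  intro fuel
  induction fuel with
  | zero => intro n s place D _ _; simp [extendGo]
  | succ fuel ih =>
    intro n s place D hs hp
    rw [extendGo_succ]
    rw [List.nodup_flatMap]
    constructor
    · intro e he
      rw [PySem.List.mem_pyRange_one] at he
      split_ifs with hD
      · apply List.nodup_cons.mpr
        refine ⟨?_, ih _ _ _ _ (by omega) (by omega)⟩
        intro hmem
        obtain ⟨e₂, m₂, h1, h2, h3, h4⟩ := extendGo_mem_rep _ _ _ _ _ _ (by omega) hmem
        have hpos : 0 < e₂ + 10 * m₂ := by omega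
        nlinarith [h4]
      · exact List.nodup_nil
    · apply List.Pairwise.imp_of_mem ?_ (PySem.List.pairwise_lt_pyRange_one (s+1) 10)
      intro e e' he he' hlt
      rw [PySem.List.mem_pyRange_one] at he he'
      intro x hx hx'
      have rep : ∀ (a : Int), s < a → a < 10 → a ≠ D →
          x ∈ (n + a * place) :: extendGo fuel (n + a * place) (s + a) (place * 10) D →
          ∃ m', 0 ≤ m' ∧ x = n + place * (a + 10 * m') := by
        intro a ha1 ha2 _ hmem
        rcases List.mem_cons.mp hmem with h | h
        · exact ⟨0, le_rfl, by rw [h]; ring⟩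
        · obtain ⟨e₂, m₂, h1, h2, h3, h4⟩ := extendGo_mem_rep _ _ _ _ _ _ (by omega) h
          exact ⟨e₂ + 10 * m₂, by omega, by rw [h4]; ring⟩
      dsimp only at hx hx'
      by_cases hD : e = D
      · simp [hD] at hx
      · by_cases hD' : e' = D
        · simp [hD'] at hx'
        · rw [if_pos hD] at hx
          rw [if_pos hD'] at hx'
          obtain ⟨a, ha0, hxa⟩ := rep e he.1 (by omega) hD hx
          obtain ⟨b, hb0, hxb⟩ := rep e' he'.1 (by omega) hD' hx'
          have hpp : place * (e + 10 * a) = place * (e' + 10 * b) := by omega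
          have heq : e + 10 * a = e' + 10 * b := mul_left_cancel₀ (by omega) hpp
          omega

def goodsBranch (D d0 : Int) : List Int :=
  if d0 ≠ D then (if 0 < d0 then [d0] else []) ++ extendGo 12 d0 d0 10 D else []

theorem goods_eq (D : Int) :
    (PySem.List.pyRange 0 10 1).foldl
      (fun g d0 => if d0 ≠ D then (g ++ (if 0 < d0 then [d0] else [])) ++ extendGo 12 d0 d0 10 D else g) [0]
    = 0 :: (PySem.List.pyRange 0 10 1).flatMap (goodsBranch D) := by
  rw [PySem.List.foldl_congr_mem _ _ (fun g d0 => g ++ goodsBranch D d0) _ (by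
    intro acc x _
    dsimp only [goodsBranch]
    by_cases h : x ≠ D
    · rw [if_pos h, if_pos h, List.append_assoc]
    · rw [if_neg h, if_neg h]; simp)]
  rw [PySem.List.foldl_append_eq_flatMap]
  simp

theorem goodsBranch_rep (D d0 x : Int) (h0 : 0 ≤ d0) (h9 : d0 < 10)
    (hx : x ∈ goodsBranch D d0) : x % 10 = d0 ∧ 1 ≤ x := by
  rw [goodsBranch] at hx
  by_cases hD : d0 = D
  · simp [hD] at hx
  · rw [if_pos hD] at hx
    rcases List.mem_append.mp hx with h | h
    · split_ifs at h with hpos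
      · simp at h; omega
      · simp at h
    · obtain ⟨e, m', he1, he2, hm', rfl⟩ := extendGo_mem_rep 12 d0 d0 10 D x h0 h
      omega

theorem goods_mem (D x : Int) :
    (x ∈ 0 :: (PySem.List.pyRange 0 10 1).flatMap (goodsBranch D)) ↔ isGood x D = true := by
  simp only [List.mem_cons, List.mem_flatMap, PySem.List.mem_pyRange_one]
  constructor
  · rintro (rfl | ⟨d0, ⟨hd0, hd9⟩, hx⟩)
    · simp [isGood]
    · rw [goodsBranch] at hx
      by_cases hD : d0 = D
      · simp [hD] at hx
      · rw [if_pos hD] at hx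
        rcases List.mem_append.mp hx with h | h
        · split_ifs at h with hpos
          · simp at h; subst h
            rw [isGood, if_neg (by omega), if_neg (by omega)]
            simp only [Bool.and_eq_true, Bool.or_eq_true, decide_eq_true_eq]
            rw [show x % 10 = x from by omega, show x / 10 = 0 from by omega]
            exact ⟨hD, Or.inl rfl⟩
          · simp at h
        · obtain ⟨m, hm, hg, rfl⟩ := (extendGo_mem 12 d0 d0 10 D (by omega) (by omega) x).mp h
          rw [isGood, if_neg (by omega), if_neg (by omega)]
          simp only [Bool.and_eq_true, Bool.or_eq_true, decide_eq_true_eq]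
          rw [show (d0 + 10 * m) % 10 = d0 from by omega, show (d0 + 10 * m) / 10 = m from by omega]
          exact ⟨hD, Or.inr hg⟩
  · intro hg
    rcases lt_trichotomy x 0 with hx | hx | hx
    · rw [isGood, if_pos hx] at hg; simp at hg
    · exact Or.inl hx
    · rw [isGood, if_neg (by omega), if_neg (by omega)] at hg
      simp only [Bool.and_eq_true, Bool.or_eq_true, decide_eq_true_eq] at hg
      obtain ⟨hD, hrest⟩ := hg
      refine Or.inr ⟨x % 10, ⟨by omega, by omega⟩, ?_⟩
      rw [goodsBranch, if_pos hD]
      rcases hrest with h0 | hgq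
      · apply List.mem_append.mpr; left
        rw [if_pos (by omega : 0 < x % 10)]
        simp; omega
      · apply List.mem_append.mpr; right
        have hq1 : 1 ≤ x / 10 := by
          by_contra hq0
          rw [goodHi, dif_pos (by omega : x / 10 ≤ 0)] at hgq
          simp at hgq
        rw [extendGo_mem 12 (x % 10) (x % 10) 10 D (by omega) (by omega)]
        exact ⟨x / 10, hq1, hgq, by omega⟩

theorem goods_nodup (D : Int) :
    (0 :: (PySem.List.pyRange 0 10 1).flatMap (goodsBranch D)).Nodup := by
  rw [List.nodup_cons]
  constructor
  · intro h
    simp only [List.mem_flatMap, PySem.List.mem_pyRange_one] at h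
    obtain ⟨d0, ⟨h0, h9⟩, hx⟩ := h
    have := goodsBranch_rep D d0 0 h0 h9 hx
    omega
  · rw [List.nodup_flatMap]
    constructor
    · intro d0 hd0
      rw [PySem.List.mem_pyRange_one] at hd0
      rw [goodsBranch]
      by_cases hD : d0 = D
      · simp [hD]
      · rw [if_pos hD]
        apply List.Nodup.append
        · split_ifs <;> simp
        · exact extendGo_nodup 12 d0 d0 10 D (by omega) (by omega)
        · intro x hx hx'
          have hxd : x = d0 := by
            split_ifs at hx with hpos
            · simpa using hx
            · simp at hx
          obtain ⟨e, m', he1, he2, hm', hrep⟩ := extendGo_mem_rep 12 d0 d0 10 D x (by omega) hx'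
          omega
    · apply List.Pairwise.imp_of_mem ?_ (PySem.List.pairwise_lt_pyRange_one 0 10)
      intro d0 d0' hd0 hd0' hlt
      rw [PySem.List.mem_pyRange_one] at hd0 hd0'
      intro x hx hx'
      have r1 := goodsBranch_rep D d0 x (by omega) (by omega) hx
      have r2 := goodsBranch_rep D d0' x (by omega) (by omega) hx'
      omega

theorem goodNumbers_eq_filter (L R D : Int) :
    goodNumbers L R D = (PySem.List.pyRange L (R+1) 1).filter (fun i => isGood i D) := by
  rw [goodNumbers]
  rw [PySem.List.foldl_append_ite_eq_filter (fun i => goodNumbersLoop (i.natAbs + 2) i 0 D = 0)]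
  rw [List.nil_append]
  exact List.filter_congr (fun x _ => loop_eq_isGood x D)

theorem goodNumbers_alt_eq_filter (L R D : Int) :
    goodNumbers_alt L R D = (PySem.List.pyRange L (R+1) 1).filter (fun i => isGood i D) := by
  rw [goodNumbers_alt]
  rw [goods_eq D]
  apply PySem.List.sorted_eq_of_perm_of_pairwise_lt
  · apply (List.perm_ext_iff_of_nodup ((PySem.List.nodup_pyRange_one L (R+1)).filter _)
      ((goods_nodup D).filter _)).mpr
    intro a
    simp only [List.mem_filter, PySem.List.mem_pyRange_one, Bool.and_eq_true, decide_eq_true_eq]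
    rw [goods_mem D a]
    constructor
    · rintro ⟨⟨h1, h2⟩, h3⟩; exact ⟨h3, by omega, by omega⟩
    · rintro ⟨h1, h2, h3⟩; exact ⟨⟨h2, by omega⟩, h1⟩
  · exact (PySem.List.pairwise_lt_pyRange_one L (R+1)).filter _

-- ===== VERDICT (by name: the statement is the Claim_ definition above) =====
theorem goodNumbers_spec : Claim_equal_goodNumbers := by
  intro L R D _
  unfold Spec_goodNumbers
  rw [goodNumbers_eq_filter, goodNumbers_alt_eq_filter]
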